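-- pv_equiv track=rewrite | github.com/kfaryn/JPK-project | utils_new.py | podziel_liste
-- ===== SOURCE A (Python) =====
-- def podziel_liste(lista, slowo_klucz=None):
--     """ Funkcja dzieląca listę słowników na podsłowniki podstawie klucza, który rozdziela każdy chunk"""
--     lista_wynikowa = []
--     podlista = []
--     for slownik in lista:
--         if slowo_klucz in slownik.keys():
--             if podlista:
--                 lista_wynikowa.append(podlista)
--                 podlista = []
--         podlista.append(slownik)
--     if podlista:
--         lista_wynikowa.append(podlista)
--     return lista_wynikowa
-- ===== SOURCE B (Python) =====
-- def podziel_liste(lista, slowo_klucz=None):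
--     """Build the chunks back-to-front: walk the list reversed, prepending each dict
--     to the front chunk unless that chunk starts with a marker dict."""
--     chunks = []
--     for slownik in reversed(lista):
--         if chunks and slowo_klucz not in chunks[0][0]:
--             chunks[0] = [slownik] + chunks[0]
--         else:
--             chunks = [[slownik]] + chunks
--     return chunks
-- ===== Notes on version B (the rewrite author's own statement) =====
-- stated objective: alternative
-- what changed: Replaces A's forward accumulate-and-flush loop (pending sublist flushed whenever a marker dict appears) with a single reversed pass that builds the chunk list back-to-front, prepending each dict into the front chunk unless that chunk starts with a marker.
import Mathlib
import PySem

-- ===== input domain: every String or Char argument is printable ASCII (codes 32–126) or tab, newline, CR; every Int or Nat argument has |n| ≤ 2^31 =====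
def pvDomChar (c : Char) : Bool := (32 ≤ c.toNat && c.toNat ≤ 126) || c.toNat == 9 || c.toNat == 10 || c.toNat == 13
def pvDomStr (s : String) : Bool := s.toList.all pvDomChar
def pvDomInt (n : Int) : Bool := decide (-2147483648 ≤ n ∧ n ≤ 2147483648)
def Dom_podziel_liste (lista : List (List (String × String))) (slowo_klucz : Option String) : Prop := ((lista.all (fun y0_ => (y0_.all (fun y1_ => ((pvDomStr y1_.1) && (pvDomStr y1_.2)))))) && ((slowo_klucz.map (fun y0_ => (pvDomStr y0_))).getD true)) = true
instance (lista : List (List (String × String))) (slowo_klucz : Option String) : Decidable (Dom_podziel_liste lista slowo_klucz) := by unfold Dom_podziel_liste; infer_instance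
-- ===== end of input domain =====

-- B builds the chunks back-to-front (one reversed pass, merging into the front chunk)
-- instead of A's forward accumulate-and-flush pass; objective: alternative, same cost.

-- `slowo_klucz in slownik.keys()`: None is never equal to a string key.
def pvKeyIn (slowo_klucz : Option String) (slownik : List (String × String)) : Bool :=
  match slowo_klucz with
  | none => false
  | some k => slownik.any (fun p => p.1 == k)

-- ===== PORT A =====
def podziel_liste (lista : List (List (String × String))) (slowo_klucz : Option String) : List (List (List (String × String))) :=
  -- state = (lista_wynikowa, podlista)
  let s := lista.foldl
    (fun (st : List (List (List (String × String))) × List (List (String × String))) slownik =>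
      let st := if pvKeyIn slowo_klucz slownik then
                  (if st.2.isEmpty then st else (st.1 ++ [st.2], []))
                else st
      (st.1, st.2 ++ [slownik]))
    ([], [])
  if s.2.isEmpty then s.1 else s.1 ++ [s.2]

-- ===== PORT B =====
def podziel_liste_alt (lista : List (List (String × String))) (slowo_klucz : Option String) : List (List (List (String × String))) :=
  -- `for slownik in reversed(lista)` = foldr; `chunks[0] = [slownik] + chunks[0]` vs new chunk
  lista.foldr
    (fun slownik chunks =>
      match chunks with
      | (d0 :: c0) :: cs =>
          if ¬ pvKeyIn slowo_klucz d0 then (slownik :: d0 :: c0) :: cs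
          else [slownik] :: chunks
      | _ => [slownik] :: chunks)
    []

-- ===== PRECONDITION & SPEC =====
def Spec_podziel_liste (lista : List (List (String × String))) (slowo_klucz : Option String) (out : List (List (List (String × String)))) : Prop := out = podziel_liste_alt lista slowo_klucz
instance (lista : List (List (String × String))) (slowo_klucz : Option String) (out : List (List (List (String × String)))) : Decidable (Spec_podziel_liste lista slowo_klucz out) := by unfold Spec_podziel_liste; infer_instance

-- ===== CLAIM (what is proved, stated in full; the proofs are below) =====
def Claim_equal_podziel_liste : Prop := ∀ (lista : List (List (String × String))) (slowo_klucz : Option String), Dom_podziel_liste lista slowo_klucz → Spec_podziel_liste lista slowo_klucz (podziel_liste lista slowo_klucz)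

-- ===== LEMMAS AND PROOFS =====

-- abbreviations for the proof
def pvStepA (k : Option String)
    (st : List (List (List (String × String))) × List (List (String × String)))
    (slownik : List (String × String)) :
    List (List (List (String × String))) × List (List (String × String)) :=
  let st := if pvKeyIn k slownik then
              (if st.2.isEmpty then st else (st.1 ++ [st.2], []))
            else st
  (st.1, st.2 ++ [slownik])

def pvStepB (k : Option String) (slownik : List (String × String))
    (chunks : List (List (List (String × String)))) :
    List (List (List (String × String))) :=
  match chunks with
  | (d0 :: c0) :: cs =>
      if ¬ pvKeyIn k d0 then (slownik :: d0 :: c0) :: cs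
      else [slownik] :: chunks
  | _ => [slownik] :: chunks

def pvFinish (s : List (List (List (String × String))) × List (List (String × String))) :
    List (List (List (String × String))) :=
  if s.2.isEmpty then s.1 else s.1 ++ [s.2]

-- prepend a (nonempty) pending chunk `acc` onto already-built chunks
def pvMerge (k : Option String) (acc : List (List (String × String)))
    (bs : List (List (List (String × String)))) :
    List (List (List (String × String))) :=
  match bs with
  | [] => [acc]
  | (d0 :: c0) :: cs => if pvKeyIn k d0 then acc :: bs else (acc ++ (d0 :: c0)) :: cs
  | c :: cs => acc :: c :: cs

theorem pvA_eq_fold (lista : List (List (String × String))) (k : Option String) :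
    podziel_liste lista k = pvFinish (lista.foldl (pvStepA k) ([], [])) := rfl

theorem pvB_eq_fold (lista : List (List (String × String))) (k : Option String) :
    podziel_liste_alt lista k = lista.foldr (pvStepB k) [] := rfl

theorem pvStepB_eq_merge (k : Option String) (d : List (String × String))
    (bs : List (List (List (String × String)))) :
    pvStepB k d bs = pvMerge k [d] bs := by
  cases bs with
  | nil => rfl
  | cons c cs =>
    cases c with
    | nil => rfl
    | cons d0 c0 => simp only [pvStepB, pvMerge]; split_ifs with h1 <;> simp_all

theorem pvMerge_stepB (k : Option String) (acc : List (List (String × String))) (d : List (String × String))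
    (bs : List (List (List (String × String)))) (hd : pvKeyIn k d = true) :
    pvMerge k acc (pvStepB k d bs) = acc :: pvStepB k d bs := by
  cases bs with
  | nil => simp [pvStepB, pvMerge, hd]
  | cons c cs =>
    cases c with
    | nil => simp [pvStepB, pvMerge, hd]
    | cons d0 c0 =>
      simp only [pvStepB]
      split_ifs <;> simp [pvMerge, hd]

theorem pvMerge_merge (k : Option String) (acc : List (List (String × String))) (d : List (String × String))
    (bs : List (List (List (String × String)))) (hd : pvKeyIn k d = false) :
    pvMerge k acc (pvMerge k [d] bs) = pvMerge k (acc ++ [d]) bs := by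
  cases bs with
  | nil => simp [pvMerge, hd]
  | cons c cs =>
    cases c with
    | nil => simp [pvMerge, hd]
    | cons d0 c0 =>
      simp only [pvMerge]
      split_ifs <;> simp_all

theorem pvFold_shift (k : Option String) (xs : List (List (String × String)))
    (res : List (List (List (String × String)))) (acc : List (List (String × String))) :
    pvFinish (xs.foldl (pvStepA k) (res, acc)) = res ++ pvFinish (xs.foldl (pvStepA k) ([], acc)) := by
  induction xs generalizing res acc with
  | nil => simp only [List.foldl_nil, pvFinish]; split_ifs <;> simp
  | cons d xs ih =>
    simp only [List.foldl_cons]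
    by_cases hk : pvKeyIn k d <;> by_cases ha : acc.isEmpty
    · simp only [pvStepA, hk, ha, if_true]
      exact ih res (acc ++ [d])
    · simp only [pvStepA, hk, ha, if_true, Bool.false_eq_true, if_false, List.nil_append]
      rw [ih (res ++ [acc]) [d], ih [acc] [d]]
      simp
    · simp only [pvStepA, hk, Bool.false_eq_true, if_false]
      exact ih res (acc ++ [d])
    · simp only [pvStepA, hk, Bool.false_eq_true, if_false]
      exact ih res (acc ++ [d])

-- the accumulator-indexed A loop equals pvMerge over B's foldr
theorem pvMain (k : Option String) (xs : List (List (String × String))) :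
    (∀ acc : List (List (String × String)), acc ≠ [] →
      pvFinish (xs.foldl (pvStepA k) ([], acc)) = pvMerge k acc (xs.foldr (pvStepB k) [])) ∧
    pvFinish (xs.foldl (pvStepA k) ([], [])) = xs.foldr (pvStepB k) [] := by
  induction xs with
  | nil =>
    constructor
    · intro acc hacc
      simp only [List.foldl_nil, List.foldr_nil, pvFinish, pvMerge]
      simp [hacc]
    · rfl
  | cons d xs ih =>
    have key : ∀ acc : List (List (String × String)), acc ≠ [] →
        pvFinish ((d :: xs).foldl (pvStepA k) ([], acc)) =
          pvMerge k acc ((d :: xs).foldr (pvStepB k) []) := by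
      intro acc hacc
      have hane : acc.isEmpty = false := by simp [hacc]
      simp only [List.foldl_cons, List.foldr_cons]
      by_cases hk : pvKeyIn k d
      · -- flush: result = acc :: (continue with [d])
        simp only [pvStepA, hk, if_true, hane, Bool.false_eq_true, if_false, List.nil_append]
        rw [pvFold_shift, (ih.1) [d] (by simp)]
        rw [pvMerge_stepB k acc d _ hk, pvStepB_eq_merge]
        simp
      · simp only [pvStepA, hk, Bool.false_eq_true, if_false]
        rw [(ih.1) (acc ++ [d]) (by simp)]
        rw [pvStepB_eq_merge, pvMerge_merge k acc d _ (by simpa using hk)]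
    refine ⟨key, ?_⟩
    simp only [List.foldl_cons, List.foldr_cons]
    by_cases hk : pvKeyIn k d
    · simp only [pvStepA, hk, if_true, List.isEmpty_nil, List.nil_append]
      rw [(ih.1) [d] (by simp), pvStepB_eq_merge]
    · simp only [pvStepA, hk, Bool.false_eq_true, if_false, List.isEmpty_nil, List.nil_append]
      rw [(ih.1) [d] (by simp), pvStepB_eq_merge]

-- ===== VERDICT (by name: the statement is the Claim_ definition above) =====
theorem podziel_liste_spec : Claim_equal_podziel_liste := by
  intro lista slowo_klucz _
  show podziel_liste lista slowo_klucz = podziel_liste_alt lista slowo_klucz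
  rw [pvA_eq_fold, pvB_eq_fold]
  exact (pvMain slowo_klucz lista).2
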